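-- pv_equiv track=rewrite | github.com/cansley/PythonProjects | PythonExercises/harder.py | sort_list_by_freq
-- ===== SOURCE A (Python) =====
-- def word_ends_with(letter, word_list):
--     return list(filter(lambda x: x[-1] == letter, word_list))
--
-- def sort_list_by_freq(freq_list, target_list):
--     cross_sorted_list = []
--     for l in freq_list:
--         x = word_ends_with(l, target_list)
--         cross_sorted_list.extend(x)
--         for z in x:
--             target_list.remove(z)
--     for z in target_list:
--         cross_sorted_list.append(z)
--     return cross_sorted_list
-- ===== SOURCE B (Python) =====
-- def sort_list_by_freq(freq_list, target_list):
--     # One pass: bucket the words by their last character, then emit buckets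
--     # in (deduplicated, single-char) freq order, then the untouched rest.
--     # Mirrors A's in-place mutation of target_list (the matched words are removed).
--     buckets = {}
--     for w in target_list:
--         buckets.setdefault(w[-1:], []).append(w)
--     out = []
--     seen = set()
--     for l in freq_list:
--         if len(l) == 1 and l not in seen:
--             seen.add(l)
--             out.extend(buckets.get(l, []))
--     rest = [w for w in target_list if w[-1:] not in seen]
--     out.extend(rest)
--     target_list[:] = rest
--     return out
-- ===== Notes on version B (the rewrite author's own statement) =====
-- stated objective: faster
-- what changed: Replaces A's per-frequency-letter rescan of target_list plus quadratic list.remove calls by a single bucketing pass (dict keyed by last character) and one emission pass over freq_list, filtering the remainder in one pass.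
import Mathlib
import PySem

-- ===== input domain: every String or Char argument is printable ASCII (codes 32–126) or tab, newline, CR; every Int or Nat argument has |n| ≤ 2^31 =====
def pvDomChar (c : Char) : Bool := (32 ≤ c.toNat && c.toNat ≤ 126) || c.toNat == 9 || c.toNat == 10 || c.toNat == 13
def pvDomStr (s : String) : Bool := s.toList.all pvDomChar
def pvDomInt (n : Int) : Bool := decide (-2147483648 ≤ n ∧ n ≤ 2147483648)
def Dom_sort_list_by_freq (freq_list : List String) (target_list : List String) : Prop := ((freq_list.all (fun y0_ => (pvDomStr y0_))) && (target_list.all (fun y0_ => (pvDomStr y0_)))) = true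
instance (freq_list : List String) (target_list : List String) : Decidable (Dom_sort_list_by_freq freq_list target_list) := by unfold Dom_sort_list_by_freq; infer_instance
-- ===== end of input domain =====

-- B replaces A's per-letter rescans and quadratic list.remove calls by one bucketing
-- pass over target_list (group by last character) followed by one emission pass over
-- freq_list; both A and B mutate the Python target_list in place the same way, the
-- theorems below are about the return value.

-- ===== PORT A =====
-- x[-1] == letter  (x[-1] raises IndexError on "" — the none branch is unreachable under Pre_)
def word_ends_with (letter : String) (word_list : List String) : List String :=
  word_list.filter (fun x =>
    match PySem.Str.pyGet? x (-1) with
    | some c => String.ofList [c] == letter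
    | none => false)

def sort_list_by_freq (freq_list : List String) (target_list : List String) : List String :=
  let st := freq_list.foldl
    (fun (st : List String × List String) l =>
      let x := word_ends_with l st.2
      -- cross_sorted_list.extend(x); then target_list.remove(z) for z in x
      (st.1 ++ x, x.foldl (fun t z => (PySem.List.remove? t z).getD t) st.2))
    ([], target_list)
  st.2.foldl (fun acc z => acc ++ [z]) st.1

-- ===== PORT B =====
-- w[-1:]  (a one-character string, "" for the empty word; never raises)
def lastStr (w : String) : String := PySem.Str.slice w (some (-1)) none

def sort_list_by_freq_alt (freq_list : List String) (target_list : List String) : List String :=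
  let buckets : PySem.Dict String (List String) :=
    target_list.foldl (fun d w => d.modify (lastStr w) [] (· ++ [w])) PySem.Dict.empty
  let st := freq_list.foldl
    (fun (st : List String × PySem.Set String) l =>
      if PySem.Str.len l == 1 && !(PySem.Set.contains st.2 l) then
        (st.1 ++ buckets.getD l [], PySem.Set.add st.2 l)
      else st)
    ([], PySem.Set.empty)
  let rest := target_list.filter (fun w => !(PySem.Set.contains st.2 (lastStr w)))
  st.1 ++ rest

-- ===== PRECONDITION & SPEC =====
-- Pre_ excludes exactly the inputs where A raises: with a nonempty freq_list,
-- an empty word in target_list makes x[-1] raise IndexError.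
def Pre_sort_list_by_freq (freq_list : List String) (target_list : List String) : Prop :=
  "" ∈ target_list → freq_list = []
instance (freq_list : List String) (target_list : List String) : Decidable (Pre_sort_list_by_freq freq_list target_list) := by unfold Pre_sort_list_by_freq; infer_instance
def pvWitness_sort_list_by_freq : List String × List String := (["a", "b"], ["ba", "c", "aa"])

def Spec_sort_list_by_freq (freq_list : List String) (target_list : List String) (out : List String) : Prop := out = sort_list_by_freq_alt freq_list target_list
instance (freq_list : List String) (target_list : List String) (out : List String) : Decidable (Spec_sort_list_by_freq freq_list target_list out) := by unfold Spec_sort_list_by_freq; infer_instance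

-- ===== CLAIM (what is proved, stated in full; the proofs are below) =====
def Claim_equal_sort_list_by_freq : Prop := ∀ (freq_list : List String) (target_list : List String), Dom_sort_list_by_freq freq_list target_list → Pre_sort_list_by_freq freq_list target_list → Spec_sort_list_by_freq freq_list target_list (sort_list_by_freq freq_list target_list)

-- ===== LEMMAS AND PROOFS =====


-- the lambda A filters with, named for the proofs (word_ends_with = filter (pA l))
def pA (l w : String) : Bool :=
  match PySem.Str.pyGet? w (-1) with
  | some c => String.ofList [c] == l
  | none => false

theorem word_ends_with_eq (l : String) (ws : List String) :
    word_ends_with l ws = ws.filter (pA l) := rfl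

def rmAll (x t : List String) : List String :=
  x.foldl (fun t z => (PySem.List.remove? t z).getD t) t

def emit (ls t : List String) : List String :=
  match ls with
  | [] => t
  | l :: ls' => t.filter (pA l) ++ emit ls' (t.filter (fun w => !pA l w))

theorem lastStr_toList (w : String) :
    (lastStr w).toList = w.toList.drop (w.toList.length - 1) := by
  simp [lastStr, PySem.Str.slice, PySem.List.slice_from_neg_one]

theorem toList_ne_nil (w : String) (h : w ≠ "") : w.toList ≠ [] := by
  intro hh
  apply h
  have := congrArg String.ofList hh
  simpa using this

theorem pA_eq (l w : String) (h : w ≠ "") : pA l w = (lastStr w == l) := by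
  have hl : w.toList ≠ [] := toList_ne_nil w h
  have h1 : PySem.Str.pyGet? w (-1) = some (w.toList.getLast hl) := by
    simp [PySem.Str.pyGet?, PySem.List.pyGet?_neg_one, List.getLast?_eq_some_getLast hl]
  have h2 : lastStr w = String.ofList [w.toList.getLast hl] := by
    have := lastStr_toList w
    rw [List.drop_length_sub_one hl] at this
    have h2 := congrArg String.ofList this
    rwa [String.ofList_toList] at h2
  rw [pA, h1, h2]

theorem pA_false_of_len (l w : String) (h : w ≠ "") (hlen : PySem.Str.len l ≠ 1) :
    pA l w = false := by
  have hl : w.toList ≠ [] := toList_ne_nil w h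
  have h1 : PySem.Str.pyGet? w (-1) = some (w.toList.getLast hl) := by
    simp [PySem.Str.pyGet?, PySem.List.pyGet?_neg_one, List.getLast?_eq_some_getLast hl]
  rw [pA, h1]
  simp only [beq_eq_false_iff_ne, ne_eq]
  intro he
  apply hlen
  rw [← he, PySem.Str.len_eq, String.toList_ofList]
  rfl

theorem rmAll_cons_ne (a : String) (xs t : List String) (hx : ∀ z ∈ xs, z ≠ a) :
    rmAll xs (a :: t) = a :: rmAll xs t := by
  induction xs generalizing t with
  | nil => rfl
  | cons z zs ih =>
    have hz : z ≠ a := hx z (by simp)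
    have hstep : ((PySem.List.remove? (a :: t) z).getD (a :: t)) =
        a :: ((PySem.List.remove? t z).getD t) := by
      rw [PySem.List.remove?_cons_of_ne t (Ne.symm hz)]
      cases PySem.List.remove? t z <;> rfl
    simp only [rmAll, List.foldl_cons] at *
    rw [hstep, ih _ (fun z hzz => hx z (by simp [hzz]))]

theorem rmAll_filter (p : String → Bool) (t : List String) :
    rmAll (t.filter p) t = t.filter (fun z => !p z) := by
  induction t with
  | nil => rfl
  | cons a t ih =>
    by_cases hp : p a = true
    · simp only [List.filter_cons, hp, if_true, rmAll, List.foldl_cons,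
        PySem.List.remove?_cons_self, Option.getD_some]
      simpa [rmAll, hp] using ih
    · have hp' : p a = false := by simpa using hp
      have hx : ∀ z ∈ t.filter p, z ≠ a := by
        intro z hz he
        have := List.of_mem_filter hz
        rw [he, hp'] at this
        exact absurd this (by simp)
      simp only [List.filter_cons, hp', if_false, Bool.false_eq_true]
      rw [rmAll_cons_ne a _ t hx, ih]
      simp

theorem A_loop (ls : List String) : ∀ (cross t : List String),
    (ls.foldl
      (fun (st : List String × List String) l =>
        (st.1 ++ word_ends_with l st.2,
         (word_ends_with l st.2).foldl (fun t z => (PySem.List.remove? t z).getD t) st.2))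
      (cross, t)).1 ++
    (ls.foldl
      (fun (st : List String × List String) l =>
        (st.1 ++ word_ends_with l st.2,
         (word_ends_with l st.2).foldl (fun t z => (PySem.List.remove? t z).getD t) st.2))
      (cross, t)).2 = cross ++ emit ls t := by
  induction ls with
  | nil => intro cross t; simp [emit]
  | cons l ls ih =>
    intro cross t
    simp only [List.foldl_cons]
    rw [word_ends_with_eq]
    have hrm : (t.filter (pA l)).foldl (fun t z => (PySem.List.remove? t z).getD t) t
        = t.filter (fun w => !pA l w) := rmAll_filter (pA l) t
    rw [hrm, ih]
    simp [emit]

theorem A_eq_emit (freq t : List String) : sort_list_by_freq freq t = emit freq t := by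
  unfold sort_list_by_freq
  rw [PySem.List.foldl_append_singleton]
  exact A_loop freq [] t

def bucketsOf (T : List String) : PySem.Dict String (List String) :=
  T.foldl (fun d w => d.modify (lastStr w) [] (· ++ [w])) PySem.Dict.empty

theorem buckets_getD (T : List String) (l : String) :
    (bucketsOf T).getD l [] = T.filter (fun w => lastStr w == l) := by
  have h := PySem.Dict.getD_foldl_modify_append
    (T.map (fun w => (lastStr w, w))) (PySem.Dict.empty (κ := String) (ν := List String)) l
  rw [List.foldl_map] at h
  simpa [bucketsOf, List.filter_map, List.map_map, Function.comp_def] using h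

theorem B_loop (T : List String) (hT : ∀ w ∈ T, w ≠ "") (ls : List String) :
    ∀ (out : List String) (seen : PySem.Set String),
    (let st := ls.foldl
        (fun (st : List String × PySem.Set String) l =>
          if PySem.Str.len l == 1 && !(PySem.Set.contains st.2 l) then
            (st.1 ++ (bucketsOf T).getD l [], PySem.Set.add st.2 l)
          else st)
        (out, seen)
     st.1 ++ T.filter (fun w => !(PySem.Set.contains st.2 (lastStr w)))) =
    out ++ emit ls (T.filter (fun w => !(PySem.Set.contains seen (lastStr w)))) := by
  induction ls with
  | nil => intro out seen; simp [emit]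
  | cons l ls ih =>
    intro out seen
    simp only [List.foldl_cons]
    by_cases hc : (PySem.Str.len l == 1 && !(PySem.Set.contains seen l)) = true
    · rw [if_pos hc]
      rw [ih (out ++ (bucketsOf T).getD l []) (PySem.Set.add seen l)]
      have hparts := Bool.and_eq_true _ _ |>.mp hc
      have hnot : PySem.Set.contains seen l = false := by
        have := hparts.2
        simp at this
        simpa using this
      have hmem : l ∉ seen := by
        intro hm
        rw [(PySem.Set.contains_iff seen l).mpr hm] at hnot
        exact absurd hnot (by simp)
      have hadd : ∀ x, PySem.Set.contains (PySem.Set.add seen l) x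
          = (PySem.Set.contains seen x || x == l) := by
        intro x
        simp [pysem, PySem.Set.add_of_not_mem hmem, Bool.beq_eq_decide_eq]
      have sub1 : (T.filter (fun w => !(PySem.Set.contains seen (lastStr w)))).filter (pA l)
          = T.filter (fun w => lastStr w == l) := by
        rw [List.filter_filter]
        apply List.filter_congr
        intro w hw
        rw [pA_eq l w (hT w hw)]
        by_cases he : lastStr w = l
        · simp [he, hmem]
        · simp [he]
      have sub2 : (T.filter (fun w => !(PySem.Set.contains seen (lastStr w)))).filter
            (fun w => !pA l w)
          = T.filter (fun w => !(PySem.Set.contains (PySem.Set.add seen l) (lastStr w))) := by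
        rw [List.filter_filter]
        apply List.filter_congr
        intro w hw
        rw [pA_eq l w (hT w hw), hadd (lastStr w)]
        by_cases he : lastStr w = l <;> by_cases h2 : lastStr w ∈ seen <;>
          simp [he, h2]
      rw [emit, buckets_getD T l, ← sub1, sub2]
      simp
    · rw [if_neg hc]
      rw [ih out seen]
      have hd : PySem.Str.len l ≠ 1 ∨ PySem.Set.contains seen l = true := by
        by_cases h1 : PySem.Str.len l = 1
        · right
          by_cases h2 : PySem.Set.contains seen l = true
          · exact h2
          · exfalso
            apply hc
            rw [Bool.and_eq_true]
            exact ⟨by simp only [beq_iff_eq]; exact h1, by simpa using h2⟩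
        · exact Or.inl h1
      have hfalse : ∀ w ∈ T.filter (fun w => !(PySem.Set.contains seen (lastStr w))),
          pA l w = false := by
        intro w hw
        rcases List.mem_filter.mp hw with ⟨hwT, hwc⟩
        rcases hd with h1 | h1
        · exact pA_false_of_len l w (hT w hwT) h1
        · have hl1 : l ∈ seen := (PySem.Set.contains_iff seen l).mp h1
          rw [pA_eq l w (hT w hwT)]
          simp only [beq_eq_false_iff_ne, ne_eq]
          intro he
          simp only [he] at hwc
          simp [hl1] at hwc
      have e1 : (T.filter (fun w => !(PySem.Set.contains seen (lastStr w)))).filter (pA l)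
          = [] := List.filter_eq_nil_iff.mpr (fun w hw => by simp [hfalse w hw])
      have e2 : (T.filter (fun w => !(PySem.Set.contains seen (lastStr w)))).filter
            (fun w => !pA l w)
          = T.filter (fun w => !(PySem.Set.contains seen (lastStr w))) :=
        List.filter_eq_self.mpr (fun w hw => by simp [hfalse w hw])
      rw [emit, e1, e2]
      simp

theorem filter_true_of (T : List String) :
    T.filter (fun w => !(PySem.Set.contains PySem.Set.empty (lastStr w))) = T := by
  simp [PySem.Set.empty, PySem.Set.contains]

theorem B_eq_emit (freq T : List String) (hT : ∀ w ∈ T, w ≠ "") :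
    sort_list_by_freq_alt freq T = emit freq T := by
  unfold sort_list_by_freq_alt
  have := B_loop T hT freq [] PySem.Set.empty
  simp only [bucketsOf] at this
  rw [this, filter_true_of]
  simp

-- ===== VERDICT (by name: the statement is the Claim_ definition above) =====
theorem sort_list_by_freq_spec : Claim_equal_sort_list_by_freq := by
  intro freq target _ hpre
  unfold Spec_sort_list_by_freq
  by_cases hf : freq = []
  · subst hf
    rw [A_eq_emit]
    unfold sort_list_by_freq_alt
    simp [emit]
  · have hT : ∀ w ∈ target, w ≠ "" := by
      intro w hw he
      subst he
      exact hf (hpre hw)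
    rw [A_eq_emit, B_eq_emit freq target hT]
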